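-- pv_equiv track=rewrite | github.com/PhelanShao/QCxMS2 | qcxms_py/src/qcxms/utility.py | sum_formula_from_atoms
-- ===== SOURCE A (Python) =====
-- from typing import List, Tuple, Optional, TypeVar, Callable, Dict
--
-- _ELEMENT_SYMBOLS = [
--     "XX", "H", "HE", "LI", "BE", "B", "C", "N", "O", "F", "NE", "NA", "MG", "AL", "SI", "P", "S", "CL", "AR",
--     "K", "CA", "SC", "TI", "V", "CR", "MN", "FE", "CO", "NI", "CU", "ZN", "GA", "GE", "AS", "SE", "BR", "KR",
--     "RB", "SR", "Y", "ZR", "NB", "MO", "TC", "RU", "RH", "PD", "AG", "CD", "IN", "SN", "SB", "TE", "I", "XE",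
--     "CS", "BA", "LA", "CE", "PR", "ND", "PM", "SM", "EU", "GD", "TB", "DY", "HO", "ER", "TM", "YB", "LU",
--     "HF", "TA", "W", "RE", "OS", "IR", "PT", "AU", "HG", "TL", "PB", "BI", "PO", "AT", "RN"
-- ]
--
-- def i2e(atomic_number: int, oformat: Optional[str] = None) -> str:
--     """Converts atomic number to element symbol string."""
--     symbol = "XX"
--     if 0 < atomic_number < len(_ELEMENT_SYMBOLS):
--         symbol = _ELEMENT_SYMBOLS[atomic_number]
--
--     if oformat:
--         if oformat in ("lc", "lowercase"):
--             return symbol.lower()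
--         elif oformat in ("nc", "nicecase"):
--             if len(symbol) > 1:
--                 return symbol[0] + symbol[1:].lower()
--             return symbol # Already nice case for single letter symbols
--     return symbol
--
-- def sum_formula_from_atoms(nat: int, atom_numbers: List[int]) -> str:
--     """Creates a sum formula string from atomic numbers (e.g., C2H4O1)."""
--     if nat == 0:
--         return ""
--
--     counts: Dict[int, int] = {}
--     for at_num in atom_numbers:
--         counts[at_num] = counts.get(at_num, 0) + 1
--
--     formula_parts = []
--     # Order: C, then H, then others alphabetically by symbol
--     # This matches common conventions like Hill system.
--
--     if 6 in counts: # Carbon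
--         formula_parts.append(f"{i2e(6, 'nc')}{counts.pop(6)}")
--     if 1 in counts: # Hydrogen
--         formula_parts.append(f"{i2e(1, 'nc')}{counts.pop(1)}")
--
--     # Add remaining elements sorted alphabetically by their symbol
--     sorted_remaining_elements = sorted(counts.keys(), key=lambda at_num: i2e(at_num, 'nc'))
--
--     for at_num in sorted_remaining_elements:
--         formula_parts.append(f"{i2e(at_num, 'nc')}{counts[at_num]}")
--
--     return "".join(formula_parts)
-- ===== SOURCE B (Python) =====
-- from typing import List, Optional
--
-- _ELEMENT_SYMBOLS = [
--     "XX", "H", "HE", "LI", "BE", "B", "C", "N", "O", "F", "NE", "NA", "MG", "AL", "SI", "P", "S", "CL", "AR",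
--     "K", "CA", "SC", "TI", "V", "CR", "MN", "FE", "CO", "NI", "CU", "ZN", "GA", "GE", "AS", "SE", "BR", "KR",
--     "RB", "SR", "Y", "ZR", "NB", "MO", "TC", "RU", "RH", "PD", "AG", "CD", "IN", "SN", "SB", "TE", "I", "XE",
--     "CS", "BA", "LA", "CE", "PR", "ND", "PM", "SM", "EU", "GD", "TB", "DY", "HO", "ER", "TM", "YB", "LU",
--     "HF", "TA", "W", "RE", "OS", "IR", "PT", "AU", "HG", "TL", "PB", "BI", "PO", "AT", "RN"
-- ]
--
-- def i2e(atomic_number: int, oformat: Optional[str] = None) -> str: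
--     symbol = "XX"
--     if 0 < atomic_number < len(_ELEMENT_SYMBOLS):
--         symbol = _ELEMENT_SYMBOLS[atomic_number]
--     if oformat:
--         if oformat in ("lc", "lowercase"):
--             return symbol.lower()
--         elif oformat in ("nc", "nicecase"):
--             if len(symbol) > 1:
--                 return symbol[0] + symbol[1:].lower()
--             return symbol
--     return symbol
--
-- def _hill_key(n: int):
--     # Carbon ranks first, hydrogen second, everything else by nicecase symbol.
--     return (0, "") if n == 6 else (1, "") if n == 1 else (2, i2e(n, "nc"))
--
-- def sum_formula_from_atoms(nat: int, atom_numbers: List[int]) -> str: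
--     """Creates a sum formula string from atomic numbers (e.g., C2H4O1)."""
--     if nat == 0:
--         return ""
--     # Selection loop: no counting dict and no sort.  Repeatedly pick the
--     # Hill-minimal remaining element, count it by length difference, drop it.
--     parts = []
--     atoms = list(atom_numbers)
--     while atoms:
--         m = min(atoms, key=_hill_key)
--         k = len(atoms)
--         atoms = [a for a in atoms if a != m]
--         parts.append(f"{i2e(m, 'nc')}{k - len(atoms)}")
--     return "".join(parts)
-- ===== Notes on version B (the rewrite author's own statement) =====
-- stated objective: alternative
-- what changed: B drops A's counting dict, the explicit C/H pop branches and the sort of the remaining keys entirely: it runs a selection loop that repeatedly picks the Hill-minimal remaining element with min(key=(rank,symbol)), counts it by length difference, and filters it out.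
import Mathlib
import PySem

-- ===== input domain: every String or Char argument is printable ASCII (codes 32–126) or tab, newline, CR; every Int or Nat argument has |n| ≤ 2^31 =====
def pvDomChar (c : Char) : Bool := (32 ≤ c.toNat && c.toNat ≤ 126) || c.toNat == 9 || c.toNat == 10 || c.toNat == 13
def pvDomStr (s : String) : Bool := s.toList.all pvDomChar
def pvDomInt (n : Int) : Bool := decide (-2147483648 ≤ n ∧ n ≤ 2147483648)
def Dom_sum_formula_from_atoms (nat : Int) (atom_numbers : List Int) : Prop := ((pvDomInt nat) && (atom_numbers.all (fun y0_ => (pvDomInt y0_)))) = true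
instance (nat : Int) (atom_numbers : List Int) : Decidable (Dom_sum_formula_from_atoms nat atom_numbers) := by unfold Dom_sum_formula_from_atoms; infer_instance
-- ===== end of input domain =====

-- B replaces A's counting dict + C/H pop branches + sort of the remaining keys by a
-- selection loop with no dict and no sort: repeatedly pick the Hill-minimal element
-- with min(key=…), count it by length difference, filter it out (objective: alternative).

-- ===== PORT A =====
-- module-level helpers shared by A and B (both Pythons use the same _ELEMENT_SYMBOLS / i2e)
def pvElementSymbols : List String := [
    "XX", "H", "HE", "LI", "BE", "B", "C", "N", "O", "F", "NE", "NA", "MG", "AL", "SI", "P", "S", "CL", "AR",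
    "K", "CA", "SC", "TI", "V", "CR", "MN", "FE", "CO", "NI", "CU", "ZN", "GA", "GE", "AS", "SE", "BR", "KR",
    "RB", "SR", "Y", "ZR", "NB", "MO", "TC", "RU", "RH", "PD", "AG", "CD", "IN", "SN", "SB", "TE", "I", "XE",
    "CS", "BA", "LA", "CE", "PR", "ND", "PM", "SM", "EU", "GD", "TB", "DY", "HO", "ER", "TM", "YB", "LU",
    "HF", "TA", "W", "RE", "OS", "IR", "PT", "AU", "HG", "TL", "PB", "BI", "PO", "AT", "RN"]

def i2e (atomic_number : Int) (oformat : Option String) : String :=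
  let symbol :=
    if 0 < atomic_number ∧ atomic_number < PySem.List.len pvElementSymbols then
      (PySem.List.pyGet? pvElementSymbols atomic_number).getD "XX"   -- index guarded in range; getD never used
    else "XX"
  match oformat with
  | none => symbol
  | some f =>
    if f = "" then symbol                                            -- Python truthiness of oformat
    else if f = "lc" ∨ f = "lowercase" then PySem.Str.lower symbol
    else if f = "nc" ∨ f = "nicecase" then
      if PySem.Str.len symbol > 1 then
        -- symbol[0] + symbol[1:].lower(); symbol[0] written as the slice [0:1] (equal: symbol is nonempty here)
        PySem.Str.slice symbol (some 0) (some 1) ++ PySem.Str.lower (PySem.Str.slice symbol (some 1) none)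
      else symbol
    else symbol

def sum_formula_from_atoms (nat : Int) (atom_numbers : List Int) : String :=
  if nat = 0 then ""
  else
    let counts : PySem.Dict Int Int :=
      atom_numbers.foldl (fun d x => d.insert x (d.getD x 0 + 1)) PySem.Dict.empty
    let formula_parts : List String := []
    -- if 6 in counts: append; counts.pop(6)  (pop = read the value, then erase)
    let s1 : List String × PySem.Dict Int Int :=
      if counts.contains 6 then
        (formula_parts ++ [i2e 6 (some "nc") ++ PySem.Int.toStr (counts.getD 6 0)], counts.erase 6)
      else (formula_parts, counts)
    let s2 : List String × PySem.Dict Int Int :=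
      if s1.2.contains 1 then
        (s1.1 ++ [i2e 1 (some "nc") ++ PySem.Int.toStr (s1.2.getD 1 0)], s1.2.erase 1)
      else (s1.1, s1.2)
    let sorted_remaining := PySem.List.sorted s2.2.keys (fun n => i2e n (some "nc")) false
    let parts := s2.1 ++ sorted_remaining.map (fun n => i2e n (some "nc") ++ PySem.Int.toStr (s2.2.getD n 0))
    PySem.Str.join "" parts

-- ===== PORT B =====
-- _hill_key n = (rank, symbol): carbon first, hydrogen second, others by nicecase symbol
def pvRank (n : Int) : Int := if n = 6 then 0 else if n = 1 then 1 else 2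
def pvSym (n : Int) : String := if n = 6 then "" else if n = 1 then "" else i2e n (some "nc")

-- termination fact for the selection loop, cited by its decreasing_by
-- (pvStep is min(key=…)'s fold step: keep the current minimum, replace on strict key decrease)
def pvStep (acc : Option Int) (x : Int) : Option Int :=
  match acc with
  | none => some x
  | some m =>
    if (decide (pvRank x < pvRank m) || !decide (pvRank m < pvRank x) && decide (pvSym x < pvSym m)) = true
    then some x else some m

lemma pv_minfold_mem : ∀ (t : List Int) (a m : Int),
    List.foldl pvStep (some a) t = some m → m = a ∨ m ∈ t := by
  intro t
  induction t with
  | nil =>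
    intro a m h
    exact Or.inl (by injection h with h; exact h.symm)
  | cons b t2 ih =>
    intro a m h
    rw [List.foldl_cons] at h
    by_cases hc : (decide (pvRank b < pvRank a) || !decide (pvRank a < pvRank b) && decide (pvSym b < pvSym a)) = true
    · have hstep : pvStep (some a) b = some b := by
        show (if (decide (pvRank b < pvRank a) || !decide (pvRank a < pvRank b) && decide (pvSym b < pvSym a)) = true
              then some b else some a) = some b
        rw [if_pos hc]
      rw [hstep] at h
      rcases ih b m h with h1 | h1
      · exact Or.inr (by simp [h1])
      · exact Or.inr (by simp [h1])
    · have hstep : pvStep (some a) b = some a := by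
        show (if (decide (pvRank b < pvRank a) || !decide (pvRank a < pvRank b) && decide (pvSym b < pvSym a)) = true
              then some b else some a) = some a
        rw [if_neg hc]
      rw [hstep] at h
      rcases ih a m h with h1 | h1
      · exact Or.inl h1
      · exact Or.inr (by simp [h1])

lemma min2?_foldl_pvStep (l : List Int) :
    PySem.List.min2? l pvRank pvSym = List.foldl pvStep none l := by
  show List.foldl _ none l = _
  congr 1
  funext acc x
  cases acc <;> rfl

lemma pv_min2_mem {l : List Int} {m : Int}
    (h : PySem.List.min2? l pvRank pvSym = some m) : m ∈ l := by
  cases l with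
  | nil =>
    rw [min2?_foldl_pvStep] at h
    cases h
  | cons a t =>
    rw [min2?_foldl_pvStep, List.foldl_cons] at h
    rcases pv_minfold_mem t a m h with h1 | h1
    · simp [h1]
    · simp [h1]

lemma pv_filter_ne_lt {m : Int} {l : List Int} (h : PySem.List.min2? l pvRank pvSym = some m) :
    (l.filter (fun x => !(x == m))).length < l.length := by
  have hm : m ∈ l := pv_min2_mem h
  have h1 : l.length
      = (l.filter (fun x => x == m)).length + (l.filter (fun x => !(x == m))).length :=
    List.length_eq_length_filter_add (fun x => x == m)
  have h2 : 0 < (l.filter (fun x => x == m)).length :=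
    List.length_pos_of_mem (List.mem_filter.mpr ⟨hm, by simp⟩)
  omega

-- while atoms: m = min(atoms, key=_hill_key); k = len(atoms); atoms = [a for a in atoms if a != m]; parts.append(...)
def pvEmitLoop : List Int → List String → List String
  | [], parts => parts
  | a :: rest, parts =>
    match h : PySem.List.min2? (a :: rest) pvRank pvSym with
    | none => parts        -- unreachable: the list is nonempty
    | some m =>
      let atoms' := (a :: rest).filter (fun x => !(x == m))
      pvEmitLoop atoms'
        (parts ++ [i2e m (some "nc") ++
          PySem.Int.toStr (PySem.List.len (a :: rest) - PySem.List.len atoms')])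
termination_by atoms _ => atoms.length
decreasing_by exact pv_filter_ne_lt h

def sum_formula_from_atoms_alt (nat : Int) (atom_numbers : List Int) : String :=
  if nat = 0 then ""
  else PySem.Str.join "" (pvEmitLoop atom_numbers [])

-- ===== PRECONDITION & SPEC =====
def Spec_sum_formula_from_atoms (nat : Int) (atom_numbers : List Int) (out : String) : Prop := out = sum_formula_from_atoms_alt nat atom_numbers
instance (nat : Int) (atom_numbers : List Int) (out : String) : Decidable (Spec_sum_formula_from_atoms nat atom_numbers out) := by unfold Spec_sum_formula_from_atoms; infer_instance

-- ===== CLAIM (what is proved, stated in full; the proofs are below) =====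
def Claim_equal_sum_formula_from_atoms : Prop := ∀ (nat : Int) (atom_numbers : List Int), Dom_sum_formula_from_atoms nat atom_numbers → Spec_sum_formula_from_atoms nat atom_numbers (sum_formula_from_atoms nat atom_numbers)

-- ===== LEMMAS AND PROOFS =====

-- the lexicographic Hill key and the two comparison booleans
def pvK (n : Int) : Int ×ₗ String := toLex (pvRank n, pvSym n)
def pvBfB (a b : Int) : Bool :=
  decide (pvRank a < pvRank b) || (!decide (pvRank b < pvRank a) && decide (pvSym a < pvSym b))
def pvBfK (a b : Int) : Bool := decide (pvK a < pvK b)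
def pvBfA (a b : Int) : Bool := decide (i2e a (some "nc") < i2e b (some "nc"))

-- canonical form both programs are reduced to
def pvG (xs : List Int) (n : Int) : String :=
  i2e n (some "nc") ++ PySem.Int.toStr (List.count n xs)

lemma pvBf_eq (a b : Int) : pvBfB a b = pvBfK a b := by
  simp only [pvBfB, pvBfK, pvK, Prod.Lex.lt_iff]
  rcases lt_trichotomy (pvRank a) (pvRank b) with h | h | h
  · simp [h, lt_asymm h]
  · simp [h]
  · simp [h, lt_asymm h, ne_of_gt h]

lemma sorted2_eq_sortedK (xs : List Int) :
    PySem.List.sorted2 xs pvRank pvSym false = PySem.List.sorted xs pvK false := by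
  show List.foldl (fun acc x => PySem.List.insertBy _ x acc) [] xs
      = List.foldl (fun acc x => PySem.List.insertBy _ x acc) [] xs
  congr 1
  funext acc x
  congr 1
  funext a b
  exact pvBf_eq a b

lemma min2?_eq_min? (xs : List Int) :
    PySem.List.min2? xs pvRank pvSym = PySem.List.min? xs pvK := by
  show List.foldl _ none xs = List.foldl _ none xs
  congr 1
  funext acc x
  cases acc with
  | none => rfl
  | some m =>
    show (if (decide (pvRank x < pvRank m) || !decide (pvRank m < pvRank x) && decide (pvSym x < pvSym m)) = true
          then some x else some m) = if pvK x < pvK m then some x else some m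
    rw [show (decide (pvRank x < pvRank m) || !decide (pvRank m < pvRank x) && decide (pvSym x < pvSym m))
          = pvBfK x m from pvBf_eq x m]
    simp [pvBfK]

lemma insertBy_cons {α : Type} (before : α → α → Bool) (x y : α) (ys : List α) :
    PySem.List.insertBy before x (y :: ys) =
      if before x y then x :: y :: ys else y :: PySem.List.insertBy before x ys := rfl

lemma sortedK_foldl (d : List Int) :
    PySem.List.sorted d pvK false = d.foldl (fun acc x => PySem.List.insertBy pvBfK x acc) [] := rfl

lemma sortedK_append (d : List Int) (x : Int) :
    PySem.List.sorted (d ++ [x]) pvK false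
      = PySem.List.insertBy pvBfK x (PySem.List.sorted d pvK false) := by
  rw [sortedK_foldl, sortedK_foldl, List.foldl_append]
  rfl

-- stable insertion commutes with filter below a sorted list
lemma insertBy_nil {α : Type} (before : α → α → Bool) (x : α) :
    PySem.List.insertBy before x [] = [x] := rfl

lemma filter_insertBy (p : Int → Bool) (x : Int) (s : List Int)
    (hs : s.Pairwise (fun a b => pvK a ≤ pvK b)) :
    (PySem.List.insertBy pvBfK x s).filter p
      = if p x then PySem.List.insertBy pvBfK x (s.filter p) else s.filter p := by
  induction s with
  | nil =>
    by_cases hpx : p x = true <;>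
      simp [insertBy_nil, hpx]
  | cons y ys ih =>
    rcases List.pairwise_cons.mp hs with ⟨hy, hys⟩
    by_cases hxy : pvBfK x y = true
    · by_cases hpx : p x = true
      · by_cases hpy : p y = true
        · simp [insertBy_cons, hxy, hpx, hpy]
        · simp only [insertBy_cons, hxy, if_true, List.filter_cons, hpx, hpy,
            Bool.false_eq_true, if_false]
          cases hf : ys.filter p with
          | nil => simp [insertBy_nil]
          | cons z zs =>
            have hz : z ∈ ys := (List.mem_filter.mp (hf ▸ List.mem_cons_self)).1
            have hxz : pvBfK x z = true := by
              simp only [pvBfK, decide_eq_true_eq] at hxy ⊢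
              exact lt_of_lt_of_le hxy (hy z hz)
            simp [insertBy_cons, hxz]
      · by_cases hpy : p y = true <;>
          simp [insertBy_cons, hxy, hpx, hpy]
    · by_cases hpx : p x = true
      · by_cases hpy : p y = true
        · simp only [insertBy_cons, hxy, Bool.false_eq_true, if_false, List.filter_cons,
            hpy, if_true, hpx]
          rw [ih hys]
          simp [hpx]
        · simp only [insertBy_cons, hxy, Bool.false_eq_true, if_false, List.filter_cons,
            hpy, hpx, if_true]
          rw [ih hys]
          simp [hpx]
      · by_cases hpy : p y = true <;>
          · simp only [insertBy_cons, hxy, Bool.false_eq_true, if_false, List.filter_cons,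
              hpy, hpx, if_true]
            rw [ih hys]
            simp [hpx]

lemma sorted_filter (p : Int → Bool) (xs : List Int) :
    PySem.List.sorted (xs.filter p) pvK false = (PySem.List.sorted xs pvK false).filter p := by
  induction xs using List.reverseRecOn with
  | nil => rfl
  | append_singleton l x ih =>
    rw [List.filter_append, sortedK_append,
        filter_insertBy p x _ (PySem.List.sorted_pairwise l pvK)]
    by_cases hpx : p x = true
    · rw [if_pos hpx, show List.filter p [x] = [x] from by simp [hpx],
        sortedK_append, ih]
    · rw [if_neg hpx, show List.filter p [x] = ([] : List Int) from by simp [hpx],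
        List.append_nil, ih]

-- dedup (= Set.ofList, a foldl of Set.add) commutes with filter
lemma ofList_filter_aux (p : Int → Bool) :
    ∀ (xs acc : List Int),
      (xs.filter p).foldl PySem.Set.add (acc.filter p)
        = (xs.foldl PySem.Set.add acc).filter p := by
  intro xs
  induction xs with
  | nil => intro acc; rfl
  | cons x t ih =>
    intro acc
    rw [List.filter_cons, List.foldl_cons]
    by_cases hpx : p x = true
    · rw [if_pos hpx, List.foldl_cons]
      have hadd : PySem.Set.add (acc.filter p) x = (PySem.Set.add acc x).filter p := by
        show (if (acc.filter p).contains x = true then acc.filter p else acc.filter p ++ [x])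
            = (if acc.contains x = true then acc else acc ++ [x]).filter p
        by_cases hm : x ∈ acc
        · have hmf : x ∈ acc.filter p := List.mem_filter.mpr ⟨hm, hpx⟩
          rw [if_pos (by simpa using hmf), if_pos (by simpa using hm)]
        · have hmf : x ∉ acc.filter p := fun hx => hm (List.mem_filter.mp hx).1
          rw [if_neg (by simpa using hmf), if_neg (by simpa using hm),
            List.filter_append, List.filter_cons, if_pos hpx, List.filter_nil]
      rw [hadd]
      exact ih _
    · rw [if_neg hpx]
      have hkeep : acc.filter p = (PySem.Set.add acc x).filter p := by
        show acc.filter p = (if acc.contains x = true then acc else acc ++ [x]).filter p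
        by_cases hm : x ∈ acc
        · rw [if_pos (by simpa using hm)]
        · rw [if_neg (by simpa using hm), List.filter_append, List.filter_cons,
            if_neg hpx, List.filter_nil, List.append_nil]
      rw [hkeep]
      exact ih _

lemma dedup_filter (p : Int → Bool) (xs : List Int) :
    PySem.List.dedup (xs.filter p) = (PySem.List.dedup xs).filter p := by
  show (xs.filter p).foldl PySem.Set.add PySem.Set.empty
      = (xs.foldl PySem.Set.add PySem.Set.empty).filter p
  have := ofList_filter_aux p xs []
  simpa using this

lemma dedup_append (xs : List Int) (x : Int) :
    PySem.List.dedup (xs ++ [x])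
      = if x ∈ xs then PySem.List.dedup xs else PySem.List.dedup xs ++ [x] := by
  show (xs ++ [x]).foldl PySem.Set.add PySem.Set.empty = _
  rw [List.foldl_append]
  show PySem.Set.add (PySem.List.dedup xs) x = _
  show (if (PySem.List.dedup xs).contains x = true then PySem.List.dedup xs
        else PySem.List.dedup xs ++ [x]) = _
  by_cases hm : x ∈ xs
  · rw [if_pos (by simpa [PySem.List.mem_dedup] using hm), if_pos hm]
  · rw [if_neg (by simpa [PySem.List.mem_dedup] using hm), if_neg hm]

-- min? recurrence and min? over dedup
lemma min?_append (l : List Int) (x : Int) :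
    PySem.List.min? (l ++ [x]) pvK
      = match PySem.List.min? l pvK with
        | none => some x
        | some m => if pvK x < pvK m then some x else some m := by
  cases hm : PySem.List.min? l pvK with
  | none =>
    have : l = [] := (PySem.List.min?_eq_none_iff l pvK).mp hm
    subst this
    rfl
  | some m0 =>
    show List.foldl _ none (l ++ [x]) = _
    rw [List.foldl_append, show List.foldl _ none l = some m0 from hm]
    rfl

lemma min?_dedup (l : List Int) :
    PySem.List.min? (PySem.List.dedup l) pvK = PySem.List.min? l pvK := by
  induction l using List.reverseRecOn with
  | nil => rfl
  | append_singleton l x ih =>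
    rw [dedup_append, min?_append]
    by_cases hm : x ∈ l
    · rw [if_pos hm, ih]
      have hne : l ≠ [] := List.ne_nil_of_mem hm
      cases hmin : PySem.List.min? l pvK with
      | none => exact absurd ((PySem.List.min?_eq_none_iff l pvK).mp hmin) hne
      | some m0 =>
        have := PySem.List.min?_isMin hmin x hm
        simp [not_lt_of_ge this]
    · rw [if_neg hm, min?_append, ih]

-- head of the stable sort is Python's min
lemma head?_sorted_eq_min? (l : List Int) :
    (PySem.List.sorted l pvK false).head? = PySem.List.min? l pvK := by
  induction l using List.reverseRecOn with
  | nil => rfl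
  | append_singleton l x ih =>
    rw [sortedK_append, min?_append]
    cases hs : PySem.List.sorted l pvK false with
    | nil =>
      have : l = [] := (PySem.List.sorted_eq_nil_iff l pvK false).mp hs
      subst this
      rfl
    | cons y ys =>
      have hy : PySem.List.min? l pvK = some y := by rw [← ih, hs]; rfl
      rw [hy, insertBy_cons]
      by_cases hb : pvBfK x y = true
      · rw [if_pos hb]
        simp only [pvBfK, decide_eq_true_eq] at hb
        simp [hb]
      · rw [if_neg hb]
        simp only [pvBfK, decide_eq_true_eq] at hb
        simp [hb]

-- the selection step peels the head off the sorted dedup list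
lemma sorted_dedup_cons {l : List Int} {m : Int}
    (hm : PySem.List.min? l pvK = some m) :
    PySem.List.sorted (PySem.List.dedup l) pvK false
      = m :: PySem.List.sorted (PySem.List.dedup (l.filter (fun x => !(x == m)))) pvK false := by
  have hhead : (PySem.List.sorted (PySem.List.dedup l) pvK false).head? = some m := by
    rw [head?_sorted_eq_min?, min?_dedup, hm]
  cases hs : PySem.List.sorted (PySem.List.dedup l) pvK false with
  | nil => rw [hs] at hhead; simp at hhead
  | cons h t =>
    rw [hs] at hhead
    have hh : h = m := by simpa using hhead
    subst hh
    have hnd : (h :: t).Nodup := by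
      rw [← hs]
      exact (PySem.List.sorted_perm _ pvK false).nodup_iff.mpr (PySem.List.nodup_dedup l)
    have hmt : h ∉ t := (List.nodup_cons.mp hnd).1
    congr 1
    rw [dedup_filter, sorted_filter, hs, List.filter_cons]
    simp only [beq_self_eq_true, Bool.not_true, Bool.false_eq_true, if_false]
    rw [List.filter_eq_self.mpr]
    intro a ha
    simp only [Bool.not_eq_eq_eq_not, Bool.not_true, beq_eq_false_iff_ne]
    exact fun he => hmt (he ▸ ha)

-- count as a length difference
lemma count_as_len (l : List Int) (m : Int) :
    PySem.List.len l - PySem.List.len (l.filter (fun x => !(x == m)))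
      = (List.count m l : Int) := by
  have h1 : l.length
      = (l.filter (fun x => x == m)).length + (l.filter (fun x => !(x == m))).length :=
    List.length_eq_length_filter_add (fun x => x == m)
  have h2 : List.count m l = (l.filter (fun x => x == m)).length :=
    List.count_eq_length_filter
  show (l.length : Int) - ((l.filter (fun x => !(x == m))).length : Int) = _
  omega

-- main loop invariant: the selection loop emits the canonical sorted-by-Hill-key parts
lemma emitLoop_eq : ∀ (N : Nat) (atoms : List Int) (parts : List String),
    atoms.length ≤ N →
    pvEmitLoop atoms parts
      = parts ++ (PySem.List.sorted (PySem.List.dedup atoms) pvK false).map (pvG atoms) := by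
  intro N
  induction N with
  | zero =>
    intro atoms parts h
    have : atoms = [] := List.eq_nil_of_length_eq_zero (Nat.le_zero.mp h)
    subst this
    rw [show pvEmitLoop [] parts = parts from by simp [pvEmitLoop],
      show PySem.List.sorted (PySem.List.dedup ([] : List Int)) pvK false = [] from rfl]
    simp
  | succ n ih =>
    intro atoms parts h
    match atoms with
    | [] =>
      rw [show pvEmitLoop [] parts = parts from by simp [pvEmitLoop],
        show PySem.List.sorted (PySem.List.dedup ([] : List Int)) pvK false = [] from rfl]
      simp
    | a :: rest =>
      rw [pvEmitLoop]
      split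
      case _ hmin =>
        rw [min2?_eq_min?] at hmin
        exact absurd ((PySem.List.min?_eq_none_iff _ pvK).mp hmin) (by simp)
      case _ m hmin =>
        have hminK : PySem.List.min? (a :: rest) pvK = some m := by
          rw [← min2?_eq_min?]; exact hmin
        have hmem : m ∈ (a :: rest) := PySem.List.min?_mem hminK
        have hlt : ((a :: rest).filter (fun x => !(x == m))).length < (a :: rest).length :=
          pv_filter_ne_lt hmin
        show pvEmitLoop ((a :: rest).filter (fun x => !(x == m)))
            (parts ++ [i2e m (some "nc") ++
              PySem.Int.toStr (PySem.List.len (a :: rest)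
                - PySem.List.len ((a :: rest).filter (fun x => !(x == m))))]) = _
        rw [ih _ _ (by simp only [List.length_cons] at h hlt ⊢; omega)]
        rw [sorted_dedup_cons hminK, List.map_cons, List.append_assoc]
        congr 1
        rw [List.singleton_append]
        congr 1
        · rw [count_as_len, pvG]
        · apply List.map_congr_left
          intro n hn
          have hn' : n ∈ (a :: rest).filter (fun x => !(x == m)) := by
            rw [PySem.List.mem_sorted, PySem.List.mem_dedup] at hn
            exact hn
          have hne' : (n == m) = false := by
            have := (List.mem_filter.mp hn').2
            simpa using this
          rw [pvG, pvG, List.count_filter (by simp [hne'])]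

-- ==== A-side: split of the composite-key sort (reused machinery) ====

def pvRem (d : List Int) : List Int := (d.filter (fun n => !(n == 6))).filter (fun n => !(n == 1))

lemma insertBy_front {α : Type} (before : α → α → Bool) (x y : α) (ys : List α)
    (h : before x y = true) : PySem.List.insertBy before x (y :: ys) = x :: y :: ys := by
  simp [insertBy_cons, h]

lemma insertBy_skip {α : Type} (before : α → α → Bool) (x : α) (p t : List α)
    (h : ∀ y ∈ p, before x y = false) :
    PySem.List.insertBy before x (p ++ t) = p ++ PySem.List.insertBy before x t := by
  induction p with
  | nil => simp
  | cons y ys ih =>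
    simp only [List.cons_append, insertBy_cons, h y (by simp), Bool.false_eq_true, if_false]
    rw [ih (fun z hz => h z (by simp [hz]))]

lemma insertBy_congr {α : Type} (before before' : α → α → Bool) (x : α) (s : List α)
    (h : ∀ y ∈ s, before x y = before' x y) :
    PySem.List.insertBy before x s = PySem.List.insertBy before' x s := by
  induction s with
  | nil => rfl
  | cons y ys ih =>
    simp only [insertBy_cons, h y (by simp)]
    rw [ih (fun z hz => h z (by simp [hz]))]

lemma sorted2_foldl (d : List Int) :
    PySem.List.sorted2 d pvRank pvSym false =
      d.foldl (fun acc x => PySem.List.insertBy pvBfB x acc) [] := rfl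

lemma sortedA_foldl (d : List Int) :
    PySem.List.sorted d (fun n => i2e n (some "nc")) false =
      d.foldl (fun acc x => PySem.List.insertBy pvBfA x acc) [] := rfl

lemma bfB_six {y : Int} (h : y ≠ 6) : pvBfB 6 y = true := by
  simp only [pvBfB, pvRank]
  by_cases h1 : y = 1 <;> simp [h, h1]

lemma bfB_one {y : Int} (h6 : y ≠ 6) (h1 : y ≠ 1) : pvBfB 1 y = true := by
  simp [pvBfB, pvRank, h6, h1]

lemma bfB_one_six : pvBfB 1 6 = false := by decide

lemma bfB_other_left {x y : Int} (hx6 : x ≠ 6) (hx1 : x ≠ 1) (hy : y = 6 ∨ y = 1) :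
    pvBfB x y = false := by
  rcases hy with rfl | rfl <;> simp [pvBfB, pvRank, hx6, hx1]

lemma bfB_other {x y : Int} (hx6 : x ≠ 6) (hx1 : x ≠ 1) (hy6 : y ≠ 6) (hy1 : y ≠ 1) :
    pvBfB x y = pvBfA x y := by
  simp [pvBfB, pvBfA, pvRank, pvSym, hx6, hx1, hy6, hy1]

lemma mem_pvRem {d : List Int} {y : Int} (h : y ∈ pvRem d) : y ∈ d ∧ y ≠ 6 ∧ y ≠ 1 := by
  simp only [pvRem, List.mem_filter, Bool.not_eq_eq_eq_not, Bool.not_true,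
    beq_eq_false_iff_ne] at h
  exact ⟨h.1.1, h.1.2, h.2⟩

lemma pvRem_append_six (d : List Int) : pvRem (d ++ [6]) = pvRem d := by
  simp [pvRem, List.filter_append]

lemma pvRem_append_one (d : List Int) : pvRem (d ++ [1]) = pvRem d := by
  simp [pvRem, List.filter_append]

lemma pvRem_append_other (d : List Int) {x : Int} (h6 : x ≠ 6) (h1 : x ≠ 1) :
    pvRem (d ++ [x]) = pvRem d ++ [x] := by
  simp [pvRem, List.filter_append, h6, h1]

-- the composite-key sort splits into: carbon, hydrogen, alphabetical sort of the rest
lemma sortSplit : ∀ d : List Int, d.Nodup →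
    PySem.List.sorted2 d pvRank pvSym false =
      (if 6 ∈ d then [(6 : Int)] else []) ++ (if 1 ∈ d then [(1 : Int)] else []) ++
        PySem.List.sorted (pvRem d) (fun n => i2e n (some "nc")) false := by
  intro d
  induction d using List.reverseRecOn with
  | nil => simp [pvRem, sorted2_foldl, sortedA_foldl]
  | append_singleton d x ih =>
    intro hnd
    have hd : d.Nodup := hnd.of_append_left
    have hx : x ∉ d := fun h => List.disjoint_of_nodup_append hnd h (by simp)
    have hS : ∀ y ∈ PySem.List.sorted (pvRem d) (fun n => i2e n (some "nc")) false,
        y ≠ 6 ∧ y ≠ 1 := by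
      intro y hy
      exact (mem_pvRem ((PySem.List.mem_sorted _ _ _ y).mp hy)).2
    rw [sorted2_foldl, List.foldl_append, ← sorted2_foldl, ih hd]
    simp only [List.foldl_cons, List.foldl_nil]
    by_cases h6 : x = 6
    · subst h6
      have h6d : (6 : Int) ∉ d := hx
      rw [pvRem_append_six]
      rw [show (if (6 : Int) ∈ d ++ [6] then [(6 : Int)] else []) = [(6 : Int)] by simp]
      rw [show (if (6 : Int) ∈ d then [(6 : Int)] else []) = ([] : List Int) by simp [h6d]]
      rw [show (if (1 : Int) ∈ d ++ [6] then [(1 : Int)] else [])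
            = (if (1 : Int) ∈ d then [(1 : Int)] else []) by simp]
      simp only [List.nil_append]
      rw [List.append_assoc]
      cases hHS : (if (1 : Int) ∈ d then [(1 : Int)] else []) ++
          PySem.List.sorted (pvRem d) (fun n => i2e n (some "nc")) false with
      | nil => rfl
      | cons y ys =>
        have hy : y ≠ 6 := by
          have hm : y ∈ (if (1 : Int) ∈ d then [(1 : Int)] else []) ++
              PySem.List.sorted (pvRem d) (fun n => i2e n (some "nc")) false := by
            rw [hHS]; simp
          rcases List.mem_append.mp hm with h | h
          · split_ifs at h with h1
            · simp at h; omega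
            · simp at h
          · exact (hS y h).1
        rw [insertBy_front pvBfB 6 y ys (bfB_six hy)]
        rfl
    · by_cases h1 : x = 1
      · subst h1
        have h1d : (1 : Int) ∉ d := hx
        rw [pvRem_append_one]
        rw [show (if (6 : Int) ∈ d ++ [1] then [(6 : Int)] else [])
              = (if (6 : Int) ∈ d then [(6 : Int)] else []) by simp]
        rw [show (if (1 : Int) ∈ d ++ [1] then [(1 : Int)] else []) = [(1 : Int)] by simp]
        rw [show (if (1 : Int) ∈ d then [(1 : Int)] else []) = ([] : List Int) by simp [h1d]]
        rw [List.append_nil]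
        rw [insertBy_skip pvBfB 1 (if (6 : Int) ∈ d then [(6 : Int)] else []) _
          (by intro y hy; split_ifs at hy with h6d
              · simp at hy; subst hy; exact bfB_one_six
              · simp at hy)]
        rw [List.append_assoc]
        congr 1
        cases hs : PySem.List.sorted (pvRem d) (fun n => i2e n (some "nc")) false with
        | nil => rfl
        | cons y ys =>
          have hy := hS y (by rw [hs]; simp)
          rw [insertBy_front pvBfB 1 y ys (bfB_one hy.1 hy.2)]
          rfl
      · -- x is neither carbon nor hydrogen
        rw [pvRem_append_other d h6 h1]
        rw [show (if (6 : Int) ∈ d ++ [x] then [(6 : Int)] else [])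
              = (if (6 : Int) ∈ d then [(6 : Int)] else []) from
            if_congr (by simp [eq_comm, h6]) rfl rfl]
        rw [show (if (1 : Int) ∈ d ++ [x] then [(1 : Int)] else [])
              = (if (1 : Int) ∈ d then [(1 : Int)] else []) from
            if_congr (by simp [eq_comm, h1]) rfl rfl]
        rw [sortedA_foldl (pvRem d ++ [x]), List.foldl_append, ← sortedA_foldl]
        simp only [List.foldl_cons, List.foldl_nil]
        rw [insertBy_skip pvBfB x
          ((if (6 : Int) ∈ d then [(6 : Int)] else []) ++ (if (1 : Int) ∈ d then [(1 : Int)] else [])) _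
          (by intro y hy
              rcases List.mem_append.mp hy with h | h
              · split_ifs at h <;> simp at h
                exact h ▸ bfB_other_left h6 h1 (Or.inl rfl)
              · split_ifs at h <;> simp at h
                exact h ▸ bfB_other_left h6 h1 (Or.inr rfl))]
        congr 1
        exact insertBy_congr pvBfB pvBfA x _
          (fun y hy => bfB_other h6 h1 (hS y hy).1 (hS y hy).2)

-- ==== dictionary-side lemmas (A's counting dict characterised) ====

lemma keys_erase (d : PySem.Dict Int Int) (k : Int) :
    (d.erase k).keys = d.keys.filter (fun x => !(x == k)) := by
  simp only [PySem.Dict.erase, PySem.Dict.keys, List.filter_map]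
  rfl

lemma erase_keep {d : PySem.Dict Int Int} {k : Int} (h : d.contains k = false) :
    d.erase k = d := by
  apply PySem.Dict.ext
  show d.items.filter _ = d.items
  rw [List.filter_eq_self]
  intro p hp
  rw [PySem.Dict.contains_eq_decide_mem_keys, decide_eq_false_iff_not] at h
  have hne : p.1 ≠ k := fun he => h (he ▸ List.mem_map_of_mem hp)
  simp [hne]

lemma counts2_items (xs : List Int) :
    (((PySem.Dict.counter xs).erase 6).erase 1).items
      = (pvRem (PySem.List.dedup xs)).map (fun n => (n, (List.count n xs : Int))) := by
  simp [PySem.Dict.erase, PySem.Dict.items_counter, pvRem, List.filter_map, Function.comp,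
    PySem.List.dedup_eq_ofList]

lemma counts2_keys (xs : List Int) :
    (((PySem.Dict.counter xs).erase 6).erase 1).keys = pvRem (PySem.List.dedup xs) := by
  simp only [PySem.Dict.keys, counts2_items, List.map_map, Function.comp_def]
  simp

lemma nodup_dedup' (xs : List Int) : (PySem.List.dedup xs).Nodup := by
  rw [PySem.List.dedup_eq_ofList]; exact PySem.Set.nodup_ofList xs

lemma nodup_pvRem_dedup (xs : List Int) : (pvRem (PySem.List.dedup xs)).Nodup :=
  ((nodup_dedup' xs).filter _).filter _

lemma counts2_getD {xs : List Int} {n : Int} (h : n ∈ pvRem (PySem.List.dedup xs)) :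
    (((PySem.Dict.counter xs).erase 6).erase 1).getD n 0 = (List.count n xs : Int) := by
  apply PySem.Dict.getD_of_mem_items
  · rw [counts2_items]
    exact List.mem_map_of_mem h
  · rw [counts2_keys]
    exact nodup_pvRem_dedup xs

lemma getD_erase6_one (xs : List Int) (h : (1 : Int) ∈ xs) :
    ((PySem.Dict.counter xs).erase 6).getD 1 0 = (List.count 1 xs : Int) := by
  apply PySem.Dict.getD_of_mem_items
  · show ((1 : Int), (List.count 1 xs : Int)) ∈ (PySem.Dict.counter xs).items.filter _
    rw [List.mem_filter]
    constructor
    · rw [PySem.Dict.items_counter]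
      exact List.mem_map_of_mem ((PySem.Set.mem_ofList xs 1).mpr h)
    · simp
  · rw [keys_erase, PySem.Dict.keys_counter]
    exact (PySem.Set.nodup_ofList xs).filter _

lemma tail_map_eq (xs : List Int) (D : PySem.Dict Int Int)
    (hD : D = ((PySem.Dict.counter xs).erase 6).erase 1) :
    List.map (fun n => i2e n (some "nc") ++
        PySem.Int.toStr (D.getD n 0))
      (PySem.List.sorted (pvRem (PySem.List.dedup xs)) (fun n => i2e n (some "nc")) false)
    = List.map (pvG xs)
      (PySem.List.sorted (pvRem (PySem.List.dedup xs)) (fun n => i2e n (some "nc")) false) := by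
  subst hD
  apply List.map_congr_left
  intro n hn
  rw [pvG, counts2_getD ((PySem.List.mem_sorted _ _ _ n).mp hn)]

lemma contains_erase6_one (xs : List Int) :
    ((PySem.Dict.counter xs).erase 6).contains 1 = xs.contains 1 := by
  rw [PySem.Dict.contains_eq_decide_mem_keys, keys_erase, PySem.Dict.keys_counter]
  simp [PySem.Set.mem_ofList]

-- ==== A to canonical ====

lemma A_eq_canon (nat : Int) (xs : List Int) :
    sum_formula_from_atoms nat xs =
      if nat = 0 then ""
      else PySem.Str.join ""
        ((PySem.List.sorted2 (PySem.List.dedup xs) pvRank pvSym false).map (pvG xs)) := by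
  unfold sum_formula_from_atoms
  by_cases h0 : nat = 0
  · simp [h0]
  · simp only [h0, if_false]
    rw [PySem.Dict.foldl_insert_getD_add_one_eq_counter]
    rw [sortSplit (PySem.List.dedup xs) (nodup_dedup' xs), List.map_append, List.map_append]
    have hkeep6 := @erase_keep (PySem.Dict.counter xs) 6
    have hkeep1e := @erase_keep ((PySem.Dict.counter xs).erase 6) 1
    by_cases hm6 : (6 : Int) ∈ xs <;> by_cases hm1 : (1 : Int) ∈ xs
    · have hc6 : (PySem.Dict.counter xs).contains 6 = true := by
        rw [PySem.Dict.contains_counter]; exact List.contains_iff_mem.mpr hm6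
      have hc1e : ((PySem.Dict.counter xs).erase 6).contains 1 = true := by
        rw [contains_erase6_one]; exact List.contains_iff_mem.mpr hm1
      have hd6 : (6 : Int) ∈ PySem.List.dedup xs := by
        rw [PySem.List.dedup_eq_ofList]; exact (PySem.Set.mem_ofList xs 6).mpr hm6
      have hd1 : (1 : Int) ∈ PySem.List.dedup xs := by
        rw [PySem.List.dedup_eq_ofList]; exact (PySem.Set.mem_ofList xs 1).mpr hm1
      simp only [hc6, hc1e, if_true, if_pos hd6, if_pos hd1]
      rw [counts2_keys, tail_map_eq xs _ rfl]
      simp [pvG, PySem.Dict.getD_counter, getD_erase6_one xs hm1]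
    · have hc6 : (PySem.Dict.counter xs).contains 6 = true := by
        rw [PySem.Dict.contains_counter]; exact List.contains_iff_mem.mpr hm6
      have hc1e : ((PySem.Dict.counter xs).erase 6).contains 1 = false := by
        rw [contains_erase6_one]
        exact Bool.eq_false_iff.mpr (fun h => hm1 (List.contains_iff_mem.mp h))
      have hd6 : (6 : Int) ∈ PySem.List.dedup xs := by
        rw [PySem.List.dedup_eq_ofList]; exact (PySem.Set.mem_ofList xs 6).mpr hm6
      have hd1 : (1 : Int) ∉ PySem.List.dedup xs := by
        rw [PySem.List.dedup_eq_ofList]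
        exact fun h => hm1 ((PySem.Set.mem_ofList xs 1).mp h)
      have hD : (PySem.Dict.counter xs).erase 6
          = ((PySem.Dict.counter xs).erase 6).erase 1 := (hkeep1e hc1e).symm
      have hk : ((PySem.Dict.counter xs).erase 6).keys = pvRem (PySem.List.dedup xs) := by
        rw [hD, counts2_keys]
      simp only [hc6, hc1e, if_true, Bool.false_eq_true, if_false, if_pos hd6, if_neg hd1]
      rw [hk, tail_map_eq xs _ hD]
      simp [pvG, PySem.Dict.getD_counter]
    · have hc6 : (PySem.Dict.counter xs).contains 6 = false := by
        rw [PySem.Dict.contains_counter]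
        exact Bool.eq_false_iff.mpr (fun h => hm6 (List.contains_iff_mem.mp h))
      have hc1 : (PySem.Dict.counter xs).contains 1 = true := by
        rw [PySem.Dict.contains_counter]; exact List.contains_iff_mem.mpr hm1
      have hd6 : (6 : Int) ∉ PySem.List.dedup xs := by
        rw [PySem.List.dedup_eq_ofList]
        exact fun h => hm6 ((PySem.Set.mem_ofList xs 6).mp h)
      have hd1 : (1 : Int) ∈ PySem.List.dedup xs := by
        rw [PySem.List.dedup_eq_ofList]; exact (PySem.Set.mem_ofList xs 1).mpr hm1
      have hD : (PySem.Dict.counter xs).erase 1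
          = ((PySem.Dict.counter xs).erase 6).erase 1 := by rw [hkeep6 hc6]
      have hk : ((PySem.Dict.counter xs).erase 1).keys = pvRem (PySem.List.dedup xs) := by
        rw [hD, counts2_keys]
      simp only [hc6, hc1, if_true, Bool.false_eq_true, if_false, if_neg hd6, if_pos hd1]
      rw [hk, tail_map_eq xs _ hD]
      simp [pvG, PySem.Dict.getD_counter]
    · have hc6 : (PySem.Dict.counter xs).contains 6 = false := by
        rw [PySem.Dict.contains_counter]
        exact Bool.eq_false_iff.mpr (fun h => hm6 (List.contains_iff_mem.mp h))
      have hc1 : (PySem.Dict.counter xs).contains 1 = false := by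
        rw [PySem.Dict.contains_counter]
        exact Bool.eq_false_iff.mpr (fun h => hm1 (List.contains_iff_mem.mp h))
      have hd6 : (6 : Int) ∉ PySem.List.dedup xs := by
        rw [PySem.List.dedup_eq_ofList]
        exact fun h => hm6 ((PySem.Set.mem_ofList xs 6).mp h)
      have hd1 : (1 : Int) ∉ PySem.List.dedup xs := by
        rw [PySem.List.dedup_eq_ofList]
        exact fun h => hm1 ((PySem.Set.mem_ofList xs 1).mp h)
      have hD : PySem.Dict.counter xs
          = ((PySem.Dict.counter xs).erase 6).erase 1 := by
        rw [hkeep6 hc6, @erase_keep (PySem.Dict.counter xs) 1 hc1]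
      have hk : (PySem.Dict.counter xs).keys = pvRem (PySem.List.dedup xs) := by
        rw [hD, counts2_keys]
      simp only [hc6, hc1, Bool.false_eq_true, if_false, if_neg hd6, if_neg hd1]
      rw [hk, tail_map_eq xs _ hD]
      simp

-- ==== B to canonical, and assembly ====

lemma B_eq_canon (nat : Int) (xs : List Int) :
    sum_formula_from_atoms_alt nat xs =
      if nat = 0 then ""
      else PySem.Str.join ""
        ((PySem.List.sorted2 (PySem.List.dedup xs) pvRank pvSym false).map (pvG xs)) := by
  unfold sum_formula_from_atoms_alt
  by_cases h0 : nat = 0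
  · simp [h0]
  · simp only [h0, if_false]
    rw [emitLoop_eq xs.length xs [] le_rfl, sorted2_eq_sortedK]
    rfl

-- ===== VERDICT (by name: the statement is the Claim_ definition above) =====
theorem sum_formula_from_atoms_spec : Claim_equal_sum_formula_from_atoms := by
  intro nat xs _
  unfold Spec_sum_formula_from_atoms
  rw [A_eq_canon, B_eq_canon]
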